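-- pv_equiv track=rewrite | github.com/philiplugt/hitori-solver | source/hitori_check.py | unique_values
-- ===== SOURCE A (Python) =====
-- def unique_values(puzzle):
--     size = len(puzzle)
--     pcol = list(zip(*puzzle)) # Invert puzzle to get columns
--     binaryboard = [[0 for i in puzzle] for j in puzzle]
--     for i in range(size):
--         for j in range(size):
--             if puzzle[i][j] != 0:
--                 if not is_duplicate(puzzle, pcol, i, j):
--                     binaryboard[i][j] = 1;
--     return binaryboard
--
-- def is_duplicate(puzzle, pcol, i, j):
--     if puzzle[i].count(puzzle[i][j]) > 1 or pcol[j].count(puzzle[i][j]) > 1: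
--         return True
--     return False
-- ===== SOURCE B (Python) =====
-- def unique_values(puzzle):
--     size = len(puzzle)
--     # mark every non-zero cell as unique, then erase duplicates
--     board = [[1 if row[j] != 0 else 0 for j in range(size)] for row in puzzle]
--     for i, row in enumerate(puzzle):
--         for j in _dup_positions(row):
--             if j < size:
--                 board[i][j] = 0
--     for j, col in enumerate(zip(*puzzle)):
--         if j < size:
--             for i in _dup_positions(col):
--                 board[i][j] = 0
--     return board
--
-- def _dup_positions(xs):
--     pos = {}
--     for k, v in enumerate(xs):
--         pos.setdefault(v, []).append(k)
--     return [k for ks in pos.values() if len(ks) > 1 for k in ks]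
-- ===== Notes on version B (the rewrite author's own statement) =====
-- stated objective: faster
-- what changed: Inverted mark-then-erase strategy: B initialises every non-zero cell to 1, then groups each row's and each column's cell indices by value into a positions dictionary and erases (sets to 0) every index group of size > 1, instead of A's per-cell row/column .count scans deciding each cell independently.
import Mathlib
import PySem

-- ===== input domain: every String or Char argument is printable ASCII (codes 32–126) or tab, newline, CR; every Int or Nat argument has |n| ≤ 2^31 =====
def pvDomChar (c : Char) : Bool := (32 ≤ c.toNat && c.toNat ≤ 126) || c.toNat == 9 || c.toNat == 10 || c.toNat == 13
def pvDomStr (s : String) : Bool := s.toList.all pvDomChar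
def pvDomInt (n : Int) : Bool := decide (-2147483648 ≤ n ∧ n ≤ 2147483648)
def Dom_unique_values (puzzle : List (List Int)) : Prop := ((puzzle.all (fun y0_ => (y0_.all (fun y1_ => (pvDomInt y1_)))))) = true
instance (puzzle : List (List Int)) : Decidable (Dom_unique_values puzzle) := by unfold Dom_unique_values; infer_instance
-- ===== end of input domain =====

-- B inverts the strategy: mark every non-zero cell 1, then group row/column indices by value in a dictionary and erase every group of size > 1 (faster).


-- ===== PORT A =====
-- list(zip(*rows)): exact hand port of Python's zip over the rows (result length = min row
-- length, tuple j holds row[j] of every row in order; zip() with no arguments is []).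
def zipStar (rows : List (List Int)) : List (List Int) :=
  match (rows.map List.length).min? with
  | none => []
  | some m => (List.range m).map (fun j => rows.map (fun r => r.getD j 0))

def is_duplicate (puzzle pcol : List (List Int)) (i j : Int) : Bool :=
  let v := PySem.List.pyGetD (PySem.List.pyGetD puzzle i []) j 0
  if 1 < (PySem.List.pyGetD puzzle i []).count v ∨ 1 < (PySem.List.pyGetD pcol j []).count v then
    true
  else false

def unique_values (puzzle : List (List Int)) : List (List Int) :=
  let size : Int := puzzle.length
  let pcol := zipStar puzzle
  let bb := puzzle.map (fun _ => puzzle.map (fun _ => (0 : Int)))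
  (PySem.List.pyRange 0 size 1).foldl (fun bb i =>
    (PySem.List.pyRange 0 size 1).foldl (fun bb j =>
      if PySem.List.pyGetD (PySem.List.pyGetD puzzle i []) j 0 ≠ 0 then
        if ¬ (is_duplicate puzzle pcol i j = true) then
          PySem.List.pySetD bb i (PySem.List.pySetD (PySem.List.pyGetD bb i []) j 1)
        else bb
      else bb) bb) bb

-- ===== PORT B =====
-- _dup_positions(xs): the list of indices whose value occurs more than once in xs,
-- grouped by value in first-occurrence order (pos.setdefault(v, []).append(k) = modify).
def dup_positions (xs : List Int) : List Int :=
  let pos : PySem.Dict Int (List Int) :=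
    (PySem.List.enumerate xs 0).foldl (fun d kv => d.modify kv.2 [] (· ++ [kv.1])) PySem.Dict.empty
  pos.values.flatMap (fun ks => if 1 < ks.length then ks else [])

def unique_values_alt (puzzle : List (List Int)) : List (List Int) :=
  let size : Int := puzzle.length
  -- row[j] for j in range(size): pyGetD is exact where Python returns (j < size ≤ len(row));
  -- where a row is shorter Python B raises IndexError, and those inputs are outside Pre_.
  let board := puzzle.map (fun row =>
    (PySem.List.pyRange 0 size 1).map (fun j => if PySem.List.pyGetD row j 0 ≠ 0 then (1 : Int) else 0))
  let board := (PySem.List.enumerate puzzle 0).foldl (fun board iv =>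
    (dup_positions iv.2).foldl (fun board j =>
      if j < size then
        PySem.List.pySetD board iv.1 (PySem.List.pySetD (PySem.List.pyGetD board iv.1 []) j 0)
      else board) board) board
  (PySem.List.enumerate (zipStar puzzle) 0).foldl (fun board jc =>
    if jc.1 < size then
      (dup_positions jc.2).foldl (fun board i =>
        PySem.List.pySetD board i (PySem.List.pySetD (PySem.List.pyGetD board i []) jc.1 0)) board
    else board) board

-- ===== PRECONDITION & SPEC =====
-- Pre_: every row at least as long as the number of rows; on shorter rows A raises IndexError
-- (puzzle[i][j] or pcol[j] out of range).
def Pre_unique_values (puzzle : List (List Int)) : Prop :=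
  ∀ row ∈ puzzle, puzzle.length ≤ row.length
instance (puzzle : List (List Int)) : Decidable (Pre_unique_values puzzle) := by
  unfold Pre_unique_values; infer_instance

def pvWitness_unique_values : List (List Int) := [[1, 2], [2, 2]]

def Spec_unique_values (puzzle : List (List Int)) (out : List (List Int)) : Prop := out = unique_values_alt puzzle
instance (puzzle : List (List Int)) (out : List (List Int)) : Decidable (Spec_unique_values puzzle out) := by unfold Spec_unique_values; infer_instance

-- ===== CLAIM (what is proved, stated in full; the proofs are below) =====
def Claim_equal_unique_values : Prop := ∀ (puzzle : List (List Int)), Dom_unique_values puzzle → Pre_unique_values puzzle → Spec_unique_values puzzle (unique_values puzzle)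

-- ===== LEMMAS AND PROOFS =====

-- ---- A-side loop shapes ----
lemma set_getD_self (bb : List (List Int)) (i : Nat) : bb.set i (bb.getD i []) = bb := by
  by_cases h : i < bb.length
  · rw [List.getD_eq_getElem bb [] h]; exact List.set_getElem_self h
  · exact List.set_eq_of_length_le (by omega)

lemma innerLoop (c : Nat → Prop) [DecidablePred c] (i : Nat) :
    ∀ (m : Nat) (bb : List (List Int)),
    (List.range m).foldl (fun bb j => if c j then bb.set i ((bb.getD i []).set j 1) else bb) bb
      = bb.set i ((bb.getD i []).mapIdx (fun j x => if j < m ∧ c j then 1 else x)) := by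
  intro m
  induction m with
  | zero =>
    intro bb; simp only [List.range_zero, List.foldl_nil]
    have h0 : ((bb.getD i []).mapIdx (fun j x => if j < 0 ∧ c j then 1 else x)) = bb.getD i [] := by
      apply List.ext_getElem <;> simp
    rw [h0, set_getD_self]
  | succ m ih =>
    intro bb
    rw [List.range_succ, List.foldl_append, ih, List.foldl_cons, List.foldl_nil]
    by_cases hc : c m
    · rw [if_pos hc]
      by_cases h : i < bb.length
      · have hget : (bb.set i ((bb.getD i []).mapIdx (fun j x => if j < m ∧ c j then 1 else x))).getD i []
            = (bb.getD i []).mapIdx (fun j x => if j < m ∧ c j then 1 else x) := by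
          rw [List.getD_eq_getElem _ [] (by simpa using h)]
          simp
        rw [hget, List.set_set]
        congr 1
        apply List.ext_getElem
        · simp
        · intro k hk1 hk2
          rw [List.getElem_set]
          simp only [List.getElem_mapIdx]
          by_cases hkm : k = m
          · subst hkm; simp [hc]
          · rw [if_neg (by omega : ¬ m = k)]
            have heq : (k < m + 1 ∧ c k) ↔ (k < m ∧ c k) := by
              constructor <;> rintro ⟨h1, h2⟩ <;> exact ⟨by omega, h2⟩
            rw [if_congr heq rfl rfl]
      · have e1 : ∀ Y : List Int, bb.set i Y = bb := fun Y => List.set_eq_of_length_le (by omega)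
        simp [e1]
    · rw [if_neg hc]
      congr 1
      apply List.ext_getElem
      · simp
      · intro k hk1 hk2
        simp only [List.getElem_mapIdx]
        by_cases hkm : k = m
        · subst hkm
          rw [if_neg (by simp [hc]), if_neg (by simp [hc])]
        · have heq : (k < m + 1 ∧ c k) ↔ (k < m ∧ c k) := by
            constructor <;> rintro ⟨h1, h2⟩ <;> exact ⟨by omega, h2⟩
          rw [if_congr heq rfl rfl]

lemma outerLoop (f : Nat → List Int → List Int) :
    ∀ (n : Nat) (bb : List (List Int)),
    (List.range n).foldl (fun bb i => bb.set i (f i (bb.getD i []))) bb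
      = bb.mapIdx (fun i row => if i < n then f i row else row) := by
  intro n
  induction n with
  | zero =>
    intro bb; simp only [List.range_zero, List.foldl_nil]
    apply List.ext_getElem <;> simp
  | succ n ih =>
    intro bb
    rw [List.range_succ, List.foldl_append, ih, List.foldl_cons, List.foldl_nil]
    by_cases h : n < bb.length
    · have hget : ((bb.mapIdx fun i row => if i < n then f i row else row).getD n [])
          = bb[n] := by
        rw [List.getD_eq_getElem _ [] (by simpa using h)]
        simp
      rw [hget]
      apply List.ext_getElem
      · simp
      · intro k hk1 hk2
        rw [List.getElem_set]
        simp only [List.getElem_mapIdx]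
        by_cases hkn : k = n
        · subst hkn; simp
        · rw [if_neg (by omega : ¬ n = k)]
          have h2 : (k < n + 1) ↔ (k < n) := by omega
          rw [if_congr h2 rfl rfl]
    · rw [List.set_eq_of_length_le (by simp; omega)]
      apply List.ext_getElem
      · simp
      · intro k hk1 hk2
        simp only [List.getElem_mapIdx]
        have h1 : k < n := by simp at hk1; omega
        have h2 : k < n + 1 := by omega
        simp [h1, h2]

lemma gridLoop (p q : Int → Int → Prop) [hp : ∀ i j, Decidable (p i j)] [hq : ∀ i j, Decidable (q i j)]
    (n : Nat) (bb : List (List Int)) :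
    (PySem.List.pyRange 0 (n : Int) 1).foldl (fun bb i =>
      (PySem.List.pyRange 0 (n : Int) 1).foldl (fun bb j =>
        if p i j then
          if q i j then
            PySem.List.pySetD bb i (PySem.List.pySetD (PySem.List.pyGetD bb i []) j 1)
          else bb
        else bb) bb) bb
    = bb.mapIdx (fun i row => if i < n then
        row.mapIdx (fun j x => if j < n ∧ p i j ∧ q i j then 1 else x) else row) := by
  simp only [PySem.List.pyRange_zero_nat, List.foldl_map, PySem.List.pySetD_natCast,
    PySem.List.pyGetD_natCast]
  have hin : ∀ (i : Nat) (bb : List (List Int)),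
      (List.range n).foldl (fun bb (j : Nat) =>
        if p ↑i ↑j then if q ↑i ↑j then bb.set i ((bb.getD i []).set j 1) else bb else bb) bb
      = bb.set i ((bb.getD i []).mapIdx (fun j x => if j < n ∧ p ↑i ↑j ∧ q ↑i ↑j then 1 else x)) := by
    intro i bb
    have hfn : (fun (bb : List (List Int)) (j : Nat) =>
        if p ↑i ↑j then if q ↑i ↑j then bb.set i ((bb.getD i []).set j 1) else bb else bb)
        = (fun (bb : List (List Int)) (j : Nat) =>
            if p ↑i ↑j ∧ q ↑i ↑j then bb.set i ((bb.getD i []).set j 1) else bb) := by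
      funext bb j
      split_ifs <;> first | rfl | tauto
    rw [hfn, innerLoop (fun j => p ↑i ↑j ∧ q ↑i ↑j) i n bb]
  have hout : (fun (bb : List (List Int)) (i : Nat) =>
      (List.range n).foldl (fun bb (j : Nat) =>
        if p ↑i ↑j then if q ↑i ↑j then bb.set i ((bb.getD i []).set j 1) else bb else bb) bb)
      = (fun (bb : List (List Int)) (i : Nat) =>
          bb.set i ((bb.getD i []).mapIdx (fun j x => if j < n ∧ p ↑i ↑j ∧ q ↑i ↑j then 1 else x))) := by
    funext bb i; exact hin i bb
  rw [hout, outerLoop (fun i row => row.mapIdx (fun j x => if j < n ∧ p ↑i ↑j ∧ q ↑i ↑j then 1 else x)) n bb]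

lemma A_eq (puzzle : List (List Int)) :
    unique_values puzzle =
      (puzzle.map (fun _ => puzzle.map (fun _ => (0 : Int)))).mapIdx
        (fun i row => if i < puzzle.length then
            row.mapIdx (fun j x => if j < puzzle.length ∧
              (PySem.List.pyGetD (PySem.List.pyGetD puzzle i []) j 0 ≠ 0 ∧
               ¬ is_duplicate puzzle (zipStar puzzle) i j = true) then 1 else x)
          else row) := by
  simp only [unique_values]
  exact gridLoop (fun i j => PySem.List.pyGetD (PySem.List.pyGetD puzzle i []) j 0 ≠ 0)
    (fun i j => ¬ is_duplicate puzzle (zipStar puzzle) i j = true) puzzle.length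
    (puzzle.map (fun _ => puzzle.map (fun _ => (0 : Int))))

-- ---- B-side: dup_positions membership ----
lemma mem_dup_positions (xs : List Int) (k : Int) :
    k ∈ dup_positions xs ↔ ∃ (n : Nat) (h : n < xs.length), k = (n : Int) ∧ 1 < xs.count xs[n] := by
  unfold dup_positions
  set E := PySem.List.enumerate xs 0 with hE
  set pos := E.foldl (fun d kv => d.modify kv.2 [] (· ++ [kv.1])) PySem.Dict.empty with hpos
  have hget : ∀ v : Int, pos.getD v [] = (E.filter (fun kv => kv.2 == v)).map (·.1) := by
    intro v
    have h1 : pos = (E.map Prod.swap).foldl (fun d p => d.modify p.1 [] (· ++ [p.2])) PySem.Dict.empty := by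
      rw [List.foldl_map]; rfl
    rw [h1, PySem.Dict.getD_foldl_modify_append, PySem.Dict.getD_empty, List.nil_append,
      List.filter_map, List.map_map]
    rfl
  have hnodup : pos.keys.Nodup := by
    rw [hpos]
    exact PySem.Dict.nodup_keys_foldl_modify_key E (·.2) [] (fun _ kv => (· ++ [kv.1]))
      PySem.Dict.empty PySem.Dict.nodup_keys_empty
  have hkeys : ∀ v : Int, v ∈ pos.keys ↔ v ∈ xs := by
    intro v
    rw [hpos, PySem.Dict.keys_foldl_modify_key E (·.2) [] (fun _ kv => (· ++ [kv.1])) PySem.Dict.empty,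
      PySem.Dict.keys_empty, PySem.Set.update_eq_append_filter]
    have hsnd : E.map (fun x => x.2) = xs := PySem.List.map_snd_enumerate xs 0
    simp [PySem.Set.mem_ofList, ← hsnd]
  have hvals : pos.values = pos.keys.map (fun v => pos.getD v []) :=
    PySem.Dict.values_eq_map_keys pos hnodup []
  have hlen : ∀ v : Int, (pos.getD v []).length = xs.count v := by
    intro v
    rw [hget, List.length_map, ← List.countP_eq_length_filter]
    have hsnd : E.map (fun x => x.2) = xs := PySem.List.map_snd_enumerate xs 0
    rw [List.count, ← hsnd, List.countP_map]
    rfl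
  have hmem : ∀ v : Int, k ∈ pos.getD v [] ↔ ∃ (n : Nat) (h : n < xs.length), xs[n] = v ∧ k = (n : Int) := by
    intro v
    rw [hget]
    simp only [List.mem_map, List.mem_filter, hE, PySem.List.mem_enumerate_iff]
    constructor
    · rintro ⟨kv, ⟨⟨n, h, rfl⟩, hv⟩, hk⟩
      exact ⟨n, h, by simpa using hv, by simpa using hk.symm⟩
    · rintro ⟨n, h, hv, rfl⟩
      exact ⟨((n : Int), xs[n]), ⟨⟨n, h, by simp⟩, by simpa using hv⟩, rfl⟩
  rw [List.mem_flatMap]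
  constructor
  · rintro ⟨ks, hks, hkin⟩
    rw [hvals, List.mem_map] at hks
    obtain ⟨v, hvk, rfl⟩ := hks
    by_cases hl : 1 < (pos.getD v []).length
    · rw [if_pos hl] at hkin
      obtain ⟨n, h, hv, rfl⟩ := (hmem v).mp hkin
      exact ⟨n, h, rfl, by rw [hv]; rw [hlen v] at hl; exact hl⟩
    · rw [if_neg hl] at hkin; exact absurd hkin (List.not_mem_nil)
  · rintro ⟨n, h, rfl, hcnt⟩
    refine ⟨pos.getD xs[n] [], ?_, ?_⟩
    · rw [hvals, List.mem_map]
      exact ⟨xs[n], (hkeys _).mpr (List.getElem_mem h), rfl⟩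
    · rw [if_pos (by rw [hlen]; exact hcnt)]
      exact (hmem _).mpr ⟨n, h, rfl, rfl⟩

-- every element of dup_positions is the cast of a Nat index
lemma dup_positions_cast (xs : List Int) : ∀ k ∈ dup_positions xs, ∃ n : Nat, k = (n : Int) := by
  intro k hk
  obtain ⟨n, _, hkn, _⟩ := (mem_dup_positions xs k).mp hk
  exact ⟨n, hkn⟩

-- ---- B-side loop shapes ----
-- setting positions listed in ks (all Nat casts) to 0, with the j < size guard
lemma setzero_list (size : Int) :
    ∀ (ks : List Int), (∀ k ∈ ks, ∃ n : Nat, k = (n : Int)) →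
    ∀ r : List Int,
    ks.foldl (fun r j => if j < size then PySem.List.pySetD r j 0 else r) r
      = r.mapIdx (fun q x => if (q : Int) ∈ ks ∧ (q : Int) < size then 0 else x) := by
  intro ks
  induction ks with
  | nil =>
    intro _ r
    simp only [List.foldl_nil]
    apply List.ext_getElem <;> simp
  | cons k ks ih =>
    intro hks r
    obtain ⟨n, rfl⟩ := hks _ (List.mem_cons_self)
    rw [List.foldl_cons]
    by_cases hB : (n : Int) < size
    · rw [if_pos hB, PySem.List.pySetD_natCast, ih (fun k hk => hks k (List.mem_cons_of_mem _ hk))]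
      apply List.ext_getElem
      · simp
      · intro q hq1 hq2
        have hlen : q < r.length := by simpa using hq2
        simp only [List.getElem_mapIdx, List.getElem_set]
        by_cases hqn : n = q
        · have hqs : (q : Int) < size := by omega
          have hm : (q : Int) ∈ ((n : Int) :: ks) := by
            rw [List.mem_cons]; exact Or.inl (by omega)
          conv_rhs => rw [if_pos ⟨hm, hqs⟩]
          split_ifs <;> rfl
        · rw [if_neg hqn]
          refine if_congr ?_ rfl rfl
          constructor
          · rintro ⟨hm, hs⟩; exact ⟨List.mem_cons_of_mem _ hm, hs⟩
          · rintro ⟨hm, hs⟩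
            rcases List.mem_cons.mp hm with h1 | h1
            · exact absurd (by omega : n = q) hqn
            · exact ⟨h1, hs⟩
    · rw [if_neg hB, ih (fun k hk => hks k (List.mem_cons_of_mem _ hk))]
      apply List.ext_getElem
      · simp
      · intro q hq1 hq2
        simp only [List.getElem_mapIdx]
        refine if_congr ?_ rfl rfl
        constructor
        · rintro ⟨hm, hs⟩; exact ⟨List.mem_cons_of_mem _ hm, hs⟩
        · rintro ⟨hm, hs⟩
          rcases List.mem_cons.mp hm with h1 | h1
          · exact absurd hs (by omega)
          · exact ⟨h1, hs⟩

-- hoisting the modified row out of the inner fold of the row pass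
lemma inner_row (size : Int) (i : Nat) :
    ∀ (ks : List Int) (b : List (List Int)),
    ks.foldl (fun b j => if j < size then
        PySem.List.pySetD b (i : Int) (PySem.List.pySetD (PySem.List.pyGetD b (i : Int) []) j 0)
      else b) b
    = b.set i (ks.foldl (fun r j => if j < size then PySem.List.pySetD r j 0 else r) (b.getD i [])) := by
  intro ks
  induction ks with
  | nil => intro b; simp only [List.foldl_nil]; exact (set_getD_self b i).symm
  | cons j ks ih =>
    intro b
    rw [List.foldl_cons, List.foldl_cons]
    by_cases hj : j < size
    · rw [if_pos hj, if_pos hj, PySem.List.pyGetD_natCast, PySem.List.pySetD_natCast, ih]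
      by_cases hi : i < b.length
      · rw [List.set_set]
        congr 1
        have hg : (b.set i (PySem.List.pySetD (b.getD i []) j 0)).getD i []
            = PySem.List.pySetD (b.getD i []) j 0 := by
          rw [List.getD_eq_getElem _ [] (by simpa using hi)]
          simp
        rw [hg]
      · rw [List.set_eq_of_length_le (by simp; omega), List.set_eq_of_length_le (by omega),
          List.set_eq_of_length_le (by omega)]
    · rw [if_neg hj, if_neg hj, ih]

-- one column step: setting board[i][j] := 0 for every i in ks (all Nat casts)
lemma colstep (j : Nat) :
    ∀ (ks : List Int), (∀ k ∈ ks, ∃ n : Nat, k = (n : Int)) →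
    ∀ b : List (List Int),
    ks.foldl (fun b i => PySem.List.pySetD b i
        (PySem.List.pySetD (PySem.List.pyGetD b i []) (j : Int) 0)) b
      = b.mapIdx (fun i r => if (i : Int) ∈ ks then r.set j 0 else r) := by
  intro ks
  induction ks with
  | nil =>
    intro _ b; simp only [List.foldl_nil]
    apply List.ext_getElem <;> simp
  | cons k ks ih =>
    intro hks b
    obtain ⟨n, rfl⟩ := hks _ (List.mem_cons_self)
    rw [List.foldl_cons, PySem.List.pyGetD_natCast, PySem.List.pySetD_natCast,
      PySem.List.pySetD_natCast, ih (fun k hk => hks k (List.mem_cons_of_mem _ hk))]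
    apply List.ext_getElem
    · simp
    · intro q hq1 hq2
      have hlen : q < b.length := by simpa using hq2
      simp only [List.getElem_mapIdx, List.getElem_set]
      by_cases hqn : n = q
      · subst hqn
        have hm : (n : Int) ∈ ((n : Int) :: ks) := List.mem_cons_self
        conv_rhs => rw [if_pos hm]
        rw [if_pos rfl]
        split_ifs with h1
        · rw [List.getD_eq_getElem _ [] hlen, List.set_set]
        · rw [List.getD_eq_getElem _ [] hlen]
      · rw [if_neg hqn]
        refine if_congr ?_ rfl rfl
        constructor
        · exact fun hm => List.mem_cons_of_mem _ hm
        · intro hm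
          rcases List.mem_cons.mp hm with h1 | h1
          · exact absurd (by omega : n = q) hqn
          · exact h1

-- folding mapIdx steps commutes with mapIdx of folds
lemma foldl_mapIdx_comm {β : Type} (g : Nat → β → List Int → List Int) :
    ∀ (l : List β) (b : List (List Int)),
    l.foldl (fun b x => b.mapIdx (fun i r => g i x r)) b
      = b.mapIdx (fun i r => l.foldl (fun r x => g i x r) r) := by
  intro l
  induction l with
  | nil =>
    intro b; simp only [List.foldl_nil]
    apply List.ext_getElem <;> simp
  | cons x l ih =>
    intro b
    rw [List.foldl_cons, ih]
    apply List.ext_getElem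
    · simp
    · intro q hq1 hq2
      simp only [List.getElem_mapIdx, List.foldl_cons]

-- per-row effect of the column pass
lemma colfold_row (c : Nat → Prop) [DecidablePred c] :
    ∀ (m : Nat) (r : List Int),
    (List.range m).foldl (fun r j => if c j then r.set j 0 else r) r
      = r.mapIdx (fun q x => if q < m ∧ c q then 0 else x) := by
  intro m
  induction m with
  | zero =>
    intro r; simp only [List.range_zero, List.foldl_nil]
    apply List.ext_getElem <;> simp
  | succ m ih =>
    intro r
    rw [List.range_succ, List.foldl_append, ih, List.foldl_cons, List.foldl_nil]
    by_cases hc : c m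
    · rw [if_pos hc]
      apply List.ext_getElem
      · simp
      · intro q hq1 hq2
        have hlen : q < r.length := by simpa using hq2
        simp only [List.getElem_set, List.getElem_mapIdx]
        by_cases hqm : m = q
        · subst hqm
          rw [if_pos rfl, if_pos ⟨by omega, hc⟩]
        · rw [if_neg hqm]
          refine if_congr ?_ rfl rfl
          constructor
          · rintro ⟨h1, h2⟩; exact ⟨by omega, h2⟩
          · rintro ⟨h1, h2⟩
            exact ⟨by omega, h2⟩
    · rw [if_neg hc]
      apply List.ext_getElem
      · simp
      · intro q hq1 hq2
        simp only [List.getElem_mapIdx]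
        refine if_congr ?_ rfl rfl
        constructor
        · rintro ⟨h1, h2⟩; exact ⟨by omega, h2⟩
        · rintro ⟨h1, h2⟩
          refine ⟨?_, h2⟩
          rcases Nat.lt_succ_iff_lt_or_eq.mp h1 with h | h
          · exact h
          · subst h; exact absurd h2 hc

theorem main_eq (puzzle : List (List Int))
    (hPre : ∀ row ∈ puzzle, puzzle.length ≤ row.length) :
    unique_values puzzle = unique_values_alt puzzle := by
  by_cases hn0 : puzzle = []
  · subst hn0; rfl
  obtain ⟨m, hm⟩ : ∃ m, (puzzle.map List.length).min? = some m := by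
    cases h : (puzzle.map List.length).min? with
    | none =>
      rw [List.min?_eq_none_iff, List.map_eq_nil_iff] at h
      exact absurd h hn0
    | some m => exact ⟨m, rfl⟩
  have hmn : puzzle.length ≤ m := by
    have hmem : m ∈ puzzle.map List.length := List.min?_mem hm
    obtain ⟨row, hrowmem, hrowlen⟩ := List.mem_map.mp hmem
    exact hrowlen ▸ hPre row hrowmem
  have hcols : zipStar puzzle = (List.range m).map (fun j => puzzle.map (fun r => r.getD j 0)) := by
    unfold zipStar; rw [hm]
  have hclen : (zipStar puzzle).length = m := by rw [hcols]; simp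
  -- closed form of B's row pass
  have hBrow : ∀ b : List (List Int),
      (PySem.List.enumerate puzzle 0).foldl (fun board iv =>
        (dup_positions iv.2).foldl (fun board j =>
          if j < (puzzle.length : Int) then
            PySem.List.pySetD board iv.1 (PySem.List.pySetD (PySem.List.pyGetD board iv.1 []) j 0)
          else board) board) b
      = b.mapIdx (fun i r => if i < puzzle.length then
          r.mapIdx (fun q x => if (q : Int) ∈ dup_positions (puzzle.getD i []) ∧ (q : Int) < (puzzle.length : Int) then 0 else x)
        else r) := by
    intro b
    simp only [PySem.List.enumerate_eq_map_pyRange puzzle [], PySem.List.len_eq,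
      PySem.List.pyRange_zero_nat, List.foldl_map]
    have hb : (fun (b : List (List Int)) (i : Nat) =>
        (dup_positions (PySem.List.pyGetD puzzle (↑i) [])).foldl (fun board j =>
          if j < (puzzle.length : Int) then
            PySem.List.pySetD board (↑i) (PySem.List.pySetD (PySem.List.pyGetD board (↑i) []) j 0)
          else board) b)
        = (fun (b : List (List Int)) (i : Nat) =>
            b.set i ((dup_positions (puzzle.getD i [])).foldl
              (fun r j => if j < (puzzle.length : Int) then PySem.List.pySetD r j 0 else r) (b.getD i []))) := by
      funext b i
      rw [inner_row, PySem.List.pyGetD_natCast]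
    rw [hb, outerLoop (fun i r => (dup_positions (puzzle.getD i [])).foldl
        (fun r j => if j < (puzzle.length : Int) then PySem.List.pySetD r j 0 else r) r) puzzle.length b]
    apply List.ext_getElem
    · simp
    · intro i hi1 hi2
      simp only [List.getElem_mapIdx]
      refine if_congr Iff.rfl ?_ rfl
      exact setzero_list _ _ (dup_positions_cast _) _
  -- closed form of B's column pass
  have hBcol : ∀ b : List (List Int),
      (PySem.List.enumerate (zipStar puzzle) 0).foldl (fun board jc =>
        if jc.1 < (puzzle.length : Int) then
          (dup_positions jc.2).foldl (fun board i =>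
            PySem.List.pySetD board i (PySem.List.pySetD (PySem.List.pyGetD board i []) jc.1 0)) board
        else board) b
      = b.mapIdx (fun i r => r.mapIdx (fun q x =>
          if q < m ∧ ((q : Int) < (puzzle.length : Int) ∧
              (i : Int) ∈ dup_positions (PySem.List.pyGetD (zipStar puzzle) (q : Int) [])) then 0 else x)) := by
    intro b
    simp only [PySem.List.enumerate_eq_map_pyRange (zipStar puzzle) [], PySem.List.len_eq,
      hclen, PySem.List.pyRange_zero_nat, List.foldl_map]
    have hstep : (fun (b : List (List Int)) (j : Nat) =>
        if (j : Int) < (puzzle.length : Int) then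
          (dup_positions (PySem.List.pyGetD (zipStar puzzle) (↑j) [])).foldl (fun board i =>
            PySem.List.pySetD board i (PySem.List.pySetD (PySem.List.pyGetD board i []) (↑j) 0)) b
        else b)
        = (fun (b : List (List Int)) (j : Nat) =>
            b.mapIdx (fun i r => if (j : Int) < (puzzle.length : Int) ∧
              (i : Int) ∈ dup_positions (PySem.List.pyGetD (zipStar puzzle) (↑j) []) then r.set j 0 else r)) := by
      funext b j
      by_cases hj : (j : Int) < (puzzle.length : Int)
      · rw [if_pos hj, colstep j _ (dup_positions_cast _) b]
        apply List.ext_getElem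
        · simp
        · intro q hq1 hq2
          simp only [List.getElem_mapIdx]
          refine if_congr ?_ rfl rfl
          simp [hj]
      · rw [if_neg hj]
        apply List.ext_getElem
        · simp
        · intro q hq1 hq2
          simp only [List.getElem_mapIdx, hj, false_and, if_false]
    rw [hstep, foldl_mapIdx_comm (fun (i : Nat) (j : Nat) (r : List Int) => if (j : Int) < (puzzle.length : Int) ∧
        (i : Int) ∈ dup_positions (PySem.List.pyGetD (zipStar puzzle) (↑j) []) then r.set j 0 else r) (List.range m) b]
    apply List.ext_getElem
    · simp
    · intro i hi1 hi2
      simp only [List.getElem_mapIdx]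
      exact colfold_row (fun q => (q : Int) < (puzzle.length : Int) ∧
        (i : Int) ∈ dup_positions (PySem.List.pyGetD (zipStar puzzle) (↑q) [])) m _
  rw [A_eq]
  show _ = unique_values_alt puzzle
  simp only [unique_values_alt]
  rw [hBrow, hBcol]
  simp only [PySem.List.pyRange_zero_nat, List.map_map]
  apply List.ext_getElem
  · simp
  · intro i hi1 hi2
    have hi : i < puzzle.length := by simpa using hi2
    have hrowlen : puzzle.length ≤ puzzle[i].length := hPre _ (List.getElem_mem hi)
    apply List.ext_getElem
    · simp [hi]
    · intro j hj1 hj2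
      have hjn : j < puzzle.length := by
        simp [hi] at hj2
        omega
      have hjm : j < m := by omega
      have hjr : j < puzzle[i].length := by omega
      have hjc : (j : Int) < (puzzle.length : Int) := by omega
      simp only [List.getElem_mapIdx, List.getElem_map, List.getElem_range, Function.comp,
        if_pos hi]
      -- resolve the Python getters
      have hv : PySem.List.pyGetD (PySem.List.pyGetD puzzle (↑i) []) (↑j) 0 = puzzle[i][j] := by
        rw [PySem.List.pyGetD_natCast, PySem.List.pyGetD_natCast,
          List.getD_eq_getElem puzzle [] hi, List.getD_eq_getElem _ _ hjr]
      have hv2 : PySem.List.pyGetD puzzle[i] (↑j) 0 = puzzle[i][j] := by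
        rw [PySem.List.pyGetD_natCast, List.getD_eq_getElem _ _ hjr]
      have hgd : puzzle.getD i [] = puzzle[i] := List.getD_eq_getElem puzzle [] hi
      have hcolj : j < (zipStar puzzle).length := by rw [hclen]; omega
      have hcolv : PySem.List.pyGetD (zipStar puzzle) (↑j) [] = puzzle.map (fun r => r.getD j 0) := by
        rw [PySem.List.pyGetD_natCast, hcols, List.getD_eq_getElem _ _ (by simp; omega)]
        simp
      -- duplicate-position memberships as counts
      have hdr : ((j : Int) ∈ dup_positions puzzle[i]) ↔ 1 < puzzle[i].count puzzle[i][j] := by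
        rw [mem_dup_positions]
        constructor
        · rintro ⟨n', h', hcast, hc⟩
          have hn' : n' = j := by omega
          subst hn'; exact hc
        · intro hc; exact ⟨j, hjr, rfl, hc⟩
      have hgdij : (puzzle.map (fun r => r.getD j 0))[i]'(by simpa using hi) = puzzle[i][j] := by
        simp only [List.getElem_map]
        exact List.getD_eq_getElem _ _ hjr
      have hdc : ((i : Int) ∈ dup_positions (puzzle.map (fun r => r.getD j 0))) ↔
          1 < (puzzle.map (fun r => r.getD j 0)).count puzzle[i][j] := by
        rw [mem_dup_positions]
        constructor
        · rintro ⟨n', h', hcast, hc⟩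
          have hn' : n' = i := by omega
          subst hn'
          rw [hgdij] at hc; exact hc
        · intro hc
          refine ⟨i, by simpa using hi, rfl, ?_⟩
          rw [hgdij]; exact hc
      -- is_duplicate in terms of counts
      have hdup : is_duplicate puzzle (zipStar puzzle) (↑i) (↑j)
          = decide (1 < puzzle[i].count puzzle[i][j]
              ∨ 1 < (puzzle.map (fun r => r.getD j 0)).count puzzle[i][j]) := by
        simp only [is_duplicate, hv]
        rw [PySem.List.pyGetD_natCast puzzle i, List.getD_eq_getElem puzzle [] hi]
        rw [hcolv]
        split_ifs with h
        · exact (decide_eq_true h).symm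
        · exact (decide_eq_false h).symm
      rw [hdup]
      simp only [hv, hv2, hgd, hcolv, decide_eq_true_eq, hdr, hdc]
      by_cases hP : puzzle[i][j] = 0 <;>
        by_cases hR : 1 < puzzle[i].count puzzle[i][j] <;>
        by_cases hC : 1 < (puzzle.map (fun r => r.getD j 0)).count puzzle[i][j] <;>
        simp [hP, hR, hC, hjn, hjm, hjc] <;> split_ifs <;> omega

-- ===== VERDICT (by name: the statement is the Claim_ definition above) =====
theorem unique_values_spec : Claim_equal_unique_values := by
  intro puzzle _hDom hPre
  show unique_values puzzle = unique_values_alt puzzle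
  exact main_eq puzzle hPre
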